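-- pv_equiv track=rewrite | github.com/sjtu-xai-lab/interaction-concept | src/tools/utils.py | simplify_coalition_name
-- ===== SOURCE A (Python) =====
-- def simplify_coalition_name(players: list):
--     # players = long_name.split("-")
--     # players = [int(player) for player in players]
--
--     players = sorted(players)
--
--     simplified_name = []
--
--     seq = [players.pop(0)]
--     while len(players) > 0:
--         cur = players.pop(0)
--         if cur == seq[-1] + 1:
--             seq.append(cur)
--         else:
--             if len(seq) > 1:
--                 simplified_name.append(f"{seq[0]}to{seq[-1]}")
--             else:
--                 simplified_name.append(f"{seq[0]}")
--             seq = [cur]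
--     if len(seq) > 0:
--         if len(seq) > 1:
--             simplified_name.append(f"{seq[0]}to{seq[-1]}")
--         else:
--             simplified_name.append(f"{seq[0]}")
--     return "-".join(simplified_name)
-- ===== SOURCE B (Python) =====
-- def simplify_coalition_name(players: list):
--     # Stage 1: collect runs as (start, end) pairs, scanning in DESCENDING order;
--     # runs ends up in descending order, so it is reversed for output.
--     runs = []
--     for x in reversed(sorted(players)):
--         if runs and runs[-1][0] == x + 1:
--             runs[-1] = (x, runs[-1][1])
--         else:
--             runs.append((x, x))
--     # Stage 2: format each run pair and join.
--     return "-".join(str(a) if a == b else f"{a}to{b}" for a, b in reversed(runs))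
-- ===== Notes on version B (the rewrite author's own statement) =====
-- stated objective: alternative
-- what changed: Instead of A's destructive forward while/pop(0) loop that materialises each run as a growing list and formats inline, B scans the sorted list in descending order building a list of (start,end) run pairs (a foldr in the port), then formats the pairs in a separate pass; avoiding pop(0) also removes A's quadratic cost.
import Mathlib
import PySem

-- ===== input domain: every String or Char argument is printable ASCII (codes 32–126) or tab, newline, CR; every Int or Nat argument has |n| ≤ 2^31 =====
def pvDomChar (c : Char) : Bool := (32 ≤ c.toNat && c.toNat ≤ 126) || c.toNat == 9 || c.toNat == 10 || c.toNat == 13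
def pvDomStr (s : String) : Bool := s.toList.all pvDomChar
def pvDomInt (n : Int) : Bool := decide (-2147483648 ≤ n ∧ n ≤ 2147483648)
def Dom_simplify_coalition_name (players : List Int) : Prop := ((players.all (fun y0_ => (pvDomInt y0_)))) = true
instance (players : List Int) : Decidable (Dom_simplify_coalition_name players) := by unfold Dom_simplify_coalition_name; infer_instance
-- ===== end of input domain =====

-- B replaces A's destructive forward while/pop(0) loop (runs kept as lists, formatted
-- inline) by a descending scan collecting (start,end) run pairs, then a separate
-- formatting pass (alternative decomposition; also avoids the quadratic pop(0)).

-- ===== PORT A =====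
-- format the current run list `seq` exactly as A does (seq[0], seq[-1], len(seq) > 1)
def pvAFmt (seq : List Int) : String :=
  if seq.length > 1 then PySem.Int.toStr seq.head! ++ "to" ++ PySem.Int.toStr seq.getLast!
  else PySem.Int.toStr seq.head!

-- the `while len(players) > 0` loop; `players` is the remaining list, `seq` and
-- `simplified_name` the loop state; the trailing `if len(seq) > 0` block is the
-- base case (seq is always nonempty there, as in A).
def pvALoop : List Int → List Int → List String → List String
  | [], seq, acc => acc ++ [pvAFmt seq]
  | cur :: rest, seq, acc =>
      if cur = seq.getLast! + 1 then pvALoop rest (seq ++ [cur]) acc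
      else pvALoop rest [cur] (acc ++ [pvAFmt seq])

def simplify_coalition_name (players : List Int) : String :=
  match PySem.List.sorted players (fun x => x) false with
  | [] => ""   -- players.pop(0) raises IndexError here; excluded by Pre_
  | h :: rest => PySem.Str.join "-" (pvALoop rest [h] [])

-- ===== PORT B =====
-- one step of B's descending scan: extend the run in front when it starts at x+1,
-- else open a new run pair.  B's Python iterates reversed(sorted(..)) appending at
-- the tail and reverses at the end; the foldr over the sorted list is that same
-- descending scan with the final reversal fused (runs held in ascending order,
-- the current run at the FRONT).
def pvBStep (x : Int) (runs : List (Int × Int)) : List (Int × Int) :=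
  match runs with
  | (a, b) :: rest => if a = x + 1 then (x, b) :: rest else (x, x) :: (a, b) :: rest
  | [] => [(x, x)]

-- stage-2 formatting of one (start,end) run pair
def pvBFmt (r : Int × Int) : String :=
  if r.1 = r.2 then PySem.Int.toStr r.1
  else PySem.Int.toStr r.1 ++ "to" ++ PySem.Int.toStr r.2

def simplify_coalition_name_alt (players : List Int) : String :=
  PySem.Str.join "-"
    (((PySem.List.sorted players (fun x => x) false).foldr pvBStep []).map pvBFmt)

-- ===== PRECONDITION & SPEC =====
-- A raises IndexError (players.pop(0)) on the empty list; it returns on every other input.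
def Pre_simplify_coalition_name (players : List Int) : Prop := players ≠ []
instance (players : List Int) : Decidable (Pre_simplify_coalition_name players) := by
  unfold Pre_simplify_coalition_name; infer_instance
def pvWitness_simplify_coalition_name : List Int := [3, 1, 2, 7]

def Spec_simplify_coalition_name (players : List Int) (out : String) : Prop := out = simplify_coalition_name_alt players
instance (players : List Int) (out : String) : Decidable (Spec_simplify_coalition_name players out) := by unfold Spec_simplify_coalition_name; infer_instance

-- ===== CLAIM (what is proved, stated in full; the proofs are below) =====
def Claim_equal_simplify_coalition_name : Prop := ∀ (players : List Int), Dom_simplify_coalition_name players → Pre_simplify_coalition_name players → Spec_simplify_coalition_name players (simplify_coalition_name players)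

-- ===== LEMMAS AND PROOFS =====

-- Glueing A's current run (endpoints s..p) onto B's runs of the remaining suffix.
def pvGlue (s p : Int) (runs : List (Int × Int)) : List (Int × Int) :=
  match runs with
  | (a, b) :: rest => if a = p + 1 then (s, b) :: rest else (s, p) :: (a, b) :: rest
  | [] => [(s, p)]

theorem pvGlue_self (x : Int) (runs : List (Int × Int)) :
    pvGlue x x runs = pvBStep x runs := by
  cases runs with
  | nil => rfl
  | cons r rest => cases r; rfl

theorem pvGlue_step (s p : Int) (runs : List (Int × Int)) :
    pvGlue s p (pvBStep (p + 1) runs) = pvGlue s (p + 1) runs := by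
  cases runs with
  | nil => simp [pvBStep, pvGlue]
  | cons r rest =>
      cases r with
      | mk a b =>
          by_cases h : a = p + 1 + 1
          · simp [pvBStep, pvGlue, h]
          · simp [pvBStep, pvGlue, h]

theorem pvGlue_new (s p cur : Int) (h : cur ≠ p + 1) (runs : List (Int × Int)) :
    pvGlue s p (pvBStep cur runs) = (s, p) :: pvBStep cur runs := by
  cases runs with
  | nil => simp [pvBStep, pvGlue, h]
  | cons r rest =>
      cases r with
      | mk a b =>
          by_cases h2 : a = cur + 1
          · simp [pvBStep, pvGlue, h, h2]
          · simp [pvBStep, pvGlue, h, h2]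

-- A's run list `seq` is the consecutive run from s to p; under that invariant A's
-- loop output is B's glued run pairs, formatted.
theorem pvLoop_eq (rest : List Int) :
    ∀ (seq : List Int) (acc : List String) (s p : Int),
      seq ≠ [] → seq.head! = s → seq.getLast! = p →
      (seq.length : Int) = p - s + 1 →
      pvALoop rest seq acc = acc ++ (pvGlue s p (rest.foldr pvBStep [])).map pvBFmt := by
  induction rest with
  | nil =>
      intro seq acc s p hne hh hl hlen
      simp only [pvALoop, List.foldr, pvGlue, pvAFmt, hh, hl]
      have h1 : 1 ≤ seq.length := List.length_pos_iff.mpr hne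
      by_cases h : s = p
      · rw [if_neg (by omega), List.map_cons]
        simp [pvBFmt, h]
      · rw [if_pos (by omega), List.map_cons]
        simp [pvBFmt, h]
  | cons cur rest ih =>
      intro seq acc s p hne hh hl hlen
      simp only [pvALoop, hl, List.foldr]
      by_cases hc : cur = p + 1
      · rw [if_pos hc, hc]
        rw [ih (seq ++ [p + 1]) acc s (p + 1) (by simp)
              (by cases seq with
                  | nil => exact absurd rfl hne
                  | cons a t => simpa using hh)
              (by rw [List.getLast!_eq_getLast?_getD, List.getLast?_concat]; rfl)
              (by simp; omega)]
        rw [pvGlue_step]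
      · rw [if_neg hc]
        rw [ih [cur] (acc ++ [pvAFmt seq]) cur cur (by simp) (by simp) (by simp) (by simp)]
        rw [pvGlue_new s p cur hc]
        have hfmt : pvAFmt seq = pvBFmt (s, p) := by
          simp only [pvAFmt, pvBFmt, hh, hl]
          have h1 : 1 ≤ seq.length := List.length_pos_iff.mpr hne
          by_cases h : s = p
          · rw [if_neg (by omega), if_pos (by simp [h])]
          · rw [if_pos (by omega), if_neg (by simp [h])]
        simp [hfmt, pvGlue_self]

-- ===== VERDICT (by name: the statement is the Claim_ definition above) =====
theorem simplify_coalition_name_spec : Claim_equal_simplify_coalition_name := by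
  intro players _ hpre
  unfold Spec_simplify_coalition_name simplify_coalition_name simplify_coalition_name_alt
  cases hs : PySem.List.sorted players (fun x => x) false with
  | nil =>
      exfalso
      have hl := PySem.List.length_sorted (xs := players) (key := fun x => x) (rev := false)
      rw [hs] at hl
      exact hpre (List.length_eq_zero_iff.mp (by simpa using hl.symm))
  | cons h rest =>
      simp only [List.foldr]
      rw [pvLoop_eq rest [h] [] h h (by simp) (by simp) (by simp) (by simp),
          pvGlue_self]
      rfl
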